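-- pv_equiv track=rewrite | github.com/sean821111/Thor | src/lib/sig_proc.py | pulse_seg
-- ===== SOURCE A (Python) =====
-- def pulse_seg(ppg_peak_loc, ppg_valley_loc):
--     pulse_loc_set = []
--     for j in range(1, len(ppg_valley_loc)):
--         # find single periodic wave
--         v0Loc = ppg_valley_loc[j-1]
--         v1Loc = ppg_valley_loc[j]
--
--         # extract single pulse
--         for k, loc in enumerate(ppg_peak_loc):
--             if loc > v0Loc and loc < v1Loc:
--                 pkLoc = ppg_peak_loc[k]
--                 pulse_loc_set.append([v0Loc, pkLoc, v1Loc])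
--                 # avoid two peak
--                 break
--     return pulse_loc_set
-- ===== SOURCE B (Python) =====
-- def pulse_seg(ppg_peak_loc, ppg_valley_loc):
--     # One pass over the peaks: each consecutive valley pair is a "slot"
--     # (v0, v1, hit); every peak fills, in peak order, all still-empty slots
--     # it falls strictly inside.  The first peak that stabs a slot wins.
--     slots = [(v0, v1, None)
--              for v0, v1 in zip(ppg_valley_loc, ppg_valley_loc[1:])]
--     for loc in ppg_peak_loc:
--         slots = [(v0, v1,
--                   [v0, loc, v1] if hit is None and v0 < loc < v1 else hit)
--                  for (v0, v1, hit) in slots]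
--     return [hit for (_, _, hit) in slots if hit is not None]
-- ===== Notes on version B (the rewrite author's own statement) =====
-- stated objective: alternative
-- what changed: Instead of re-scanning the whole peak list from the start for every valley pair, B sweeps the peaks once, maintaining per-pair slot state (first stabbing peak, filled at most once), then collects the filled slots in pair order.
import Mathlib
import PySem

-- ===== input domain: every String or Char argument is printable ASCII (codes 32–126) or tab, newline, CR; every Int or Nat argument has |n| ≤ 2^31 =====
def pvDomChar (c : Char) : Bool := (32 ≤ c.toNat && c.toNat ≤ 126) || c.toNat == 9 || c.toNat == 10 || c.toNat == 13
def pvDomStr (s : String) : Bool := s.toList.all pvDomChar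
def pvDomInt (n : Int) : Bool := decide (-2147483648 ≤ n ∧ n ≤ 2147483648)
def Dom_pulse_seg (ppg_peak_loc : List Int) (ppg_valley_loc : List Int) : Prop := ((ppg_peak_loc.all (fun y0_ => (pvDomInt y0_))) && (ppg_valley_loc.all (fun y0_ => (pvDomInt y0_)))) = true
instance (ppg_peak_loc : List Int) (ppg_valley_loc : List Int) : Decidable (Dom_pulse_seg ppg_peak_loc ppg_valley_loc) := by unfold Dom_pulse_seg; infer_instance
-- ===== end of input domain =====

-- B restructures A: one sweep over the peaks filling per-valley-pair slots,
-- instead of re-scanning the peak list for every valley pair (objective: alternative).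

-- ===== PORT A =====
-- inner 'for k, loc in enumerate(ppg_peak_loc): … break' of A: first peak strictly between v0 and v1
def pulseFirstPeak (peaks : List Int) (v0 v1 : Int) : Option Int :=
  match peaks with
  | [] => none
  | loc :: rest => if loc > v0 ∧ loc < v1 then some loc else pulseFirstPeak rest v0 v1

def pulse_seg (ppg_peak_loc : List Int) (ppg_valley_loc : List Int) : List (List Int) :=
  (PySem.List.pyRange 1 (ppg_valley_loc.length : Int) 1).foldl
    (fun pulse_loc_set j =>
      match PySem.List.pyGet? ppg_valley_loc (j - 1), PySem.List.pyGet? ppg_valley_loc j with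
      | some v0Loc, some v1Loc =>
          match pulseFirstPeak ppg_peak_loc v0Loc v1Loc with
          | some pkLoc => pulse_loc_set ++ [[v0Loc, pkLoc, v1Loc]]
          | none => pulse_loc_set
      | _, _ => pulse_loc_set)   -- unreachable: j-1 and j are always in range
    []

-- ===== PORT B =====
-- one slot per consecutive valley pair: (v0, v1, hit)
def pulseStepSlot (loc : Int) (s : Int × Int × Option (List Int)) : Int × Int × Option (List Int) :=
  (s.1, s.2.1, if s.2.2 = none ∧ s.1 < loc ∧ loc < s.2.1 then some [s.1, loc, s.2.1] else s.2.2)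

def pulse_seg_alt (ppg_peak_loc : List Int) (ppg_valley_loc : List Int) : List (List Int) :=
  let slots := (ppg_valley_loc.zip ppg_valley_loc.tail).map
    (fun p => (p.1, p.2, (none : Option (List Int))))
  let final := ppg_peak_loc.foldl (fun ss loc => ss.map (pulseStepSlot loc)) slots
  final.filterMap (fun s => s.2.2)

-- ===== PRECONDITION & SPEC =====
def Spec_pulse_seg (ppg_peak_loc : List Int) (ppg_valley_loc : List Int) (out : List (List Int)) : Prop := out = pulse_seg_alt ppg_peak_loc ppg_valley_loc
instance (ppg_peak_loc : List Int) (ppg_valley_loc : List Int) (out : List (List Int)) : Decidable (Spec_pulse_seg ppg_peak_loc ppg_valley_loc out) := by unfold Spec_pulse_seg; infer_instance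

-- ===== CLAIM (what is proved, stated in full; the proofs are below) =====
def Claim_equal_pulse_seg : Prop := ∀ (ppg_peak_loc : List Int) (ppg_valley_loc : List Int), Dom_pulse_seg ppg_peak_loc ppg_valley_loc → Spec_pulse_seg ppg_peak_loc ppg_valley_loc (pulse_seg ppg_peak_loc ppg_valley_loc)

-- ===== LEMMAS AND PROOFS =====

-- folding a per-element map over a list distributes to each element
theorem pulse_foldl_map_comm (ps : List Int) :
    ∀ (ss : List (Int × Int × Option (List Int))),
      ps.foldl (fun ss loc => ss.map (pulseStepSlot loc)) ss
        = ss.map (fun s => ps.foldl (fun s loc => pulseStepSlot loc s) s) := by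
  induction ps with
  | nil => intro ss; simp
  | cons p ps ih =>
      intro ss
      simp [List.foldl_cons, ih, List.map_map, Function.comp]

-- a filled slot never changes
theorem pulse_fold_some (ps : List Int) (v0 v1 : Int) (x : List Int) :
    ps.foldl (fun s loc => pulseStepSlot loc s) (v0, v1, some x) = (v0, v1, some x) := by
  induction ps with
  | nil => rfl
  | cons p ps ih => simpa [pulseStepSlot] using ih

-- the slot sweep computes the first stabbing peak
theorem pulse_fold_none (ps : List Int) (v0 v1 : Int) :
    ps.foldl (fun s loc => pulseStepSlot loc s) (v0, v1, none)
      = (v0, v1, (pulseFirstPeak ps v0 v1).map (fun pk => [v0, pk, v1])) := by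
  induction ps with
  | nil => rfl
  | cons p ps ih =>
      rw [List.foldl_cons]
      by_cases h : v0 < p ∧ p < v1
      · have hstep : pulseStepSlot p (v0, v1, none) = (v0, v1, some [v0, p, v1]) := by
          simp [pulseStepSlot, h.1, h.2]
        rw [hstep, pulse_fold_some]
        simp [pulseFirstPeak, h.1, h.2]
      · have hstep : pulseStepSlot p (v0, v1, none) = (v0, v1, none) := by
          simp only [pulseStepSlot]
          simp
          intro h1
          exact le_of_not_gt fun h2 => h ⟨h1, h2⟩
        have hfp : pulseFirstPeak (p :: ps) v0 v1 = pulseFirstPeak ps v0 v1 := by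
          simp [pulseFirstPeak, h]
        rw [hstep, hfp]
        exact ih

-- range-indexed flatMap over consecutive pairs = flatMap over the zip
theorem pulse_range_zip (g : Int -> Int -> List (List Int)) :
    ∀ (w : List Int),
      (List.range (w.length - 1)).flatMap
          (fun k => match w[k]?, w[k + 1]? with
                    | some a, some b => g a b
                    | _, _ => [])
        = (w.zip w.tail).flatMap (fun p => g p.1 p.2) := by
  intro w
  induction w with
  | nil => simp
  | cons v0 vs ih =>
      cases vs with
      | nil => simp
      | cons v1 vs' =>
          have hr : List.range ((v0 :: v1 :: vs').length - 1)
              = 0 :: (List.range ((v1 :: vs').length - 1)).map (· + 1) := by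
            simp [List.range_succ_eq_map]
          rw [hr]
          simp only [List.flatMap_cons, List.flatMap_map, List.getElem?_cons_zero,
            List.getElem?_cons_succ, List.zip_cons_cons, List.tail_cons]
          simp only [List.getElem?_cons_succ, List.tail_cons] at ih
          rw [ih]

theorem pulse_seg_eq_zip (peaks w : List Int) :
    pulse_seg peaks w
      = (w.zip w.tail).flatMap
          (fun p => ((pulseFirstPeak peaks p.1 p.2).map (fun pk => [p.1, pk, p.2])).toList) := by
  unfold pulse_seg
  rw [PySem.List.pyRange_one, List.foldl_map]
  have hbody : (fun (acc : List (List Int)) (k : Nat) =>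
      match PySem.List.pyGet? w ((1 + (k : Int)) - 1), PySem.List.pyGet? w (1 + (k : Int)) with
      | some v0Loc, some v1Loc =>
          match pulseFirstPeak peaks v0Loc v1Loc with
          | some pkLoc => acc ++ [[v0Loc, pkLoc, v1Loc]]
          | none => acc
      | _, _ => acc)
      = (fun acc k => acc ++
          (match w[k]?, w[k + 1]? with
           | some a, some b => ((pulseFirstPeak peaks a b).map (fun pk => [a, pk, b])).toList
           | _, _ => [])) := by
    funext acc k
    have h1 : (1 + (k : Int)) - 1 = ((k : Nat) : Int) := by ring
    have h2 : 1 + (k : Int) = (((k + 1 : Nat)) : Int) := by push_cast; ring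
    rw [h1, h2, PySem.List.pyGet?_natCast, PySem.List.pyGet?_natCast]
    cases w[k]? with
    | none => simp
    | some a =>
        cases w[k + 1]? with
        | none => simp
        | some b =>
            cases hfp : pulseFirstPeak peaks a b <;> simp [hfp]
  rw [hbody]
  rw [PySem.List.foldl_append_eq_flatMap]
  have hn : (((w.length : Int)) - 1).toNat = w.length - 1 := by omega
  rw [hn, pulse_range_zip (fun a b => ((pulseFirstPeak peaks a b).map (fun pk => [a, pk, b])).toList)]
  simp

-- ===== VERDICT (by name: the statement is the Claim_ definition above) =====
theorem pulse_seg_spec : Claim_equal_pulse_seg := by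
  intro peaks w _
  unfold Spec_pulse_seg pulse_seg_alt
  rw [pulse_seg_eq_zip]
  simp only [pulse_foldl_map_comm, List.map_map, Function.comp_def, pulse_fold_none]
  rw [List.filterMap_map, List.filterMap_eq_flatMap_toList]
  simp [Function.comp]
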